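-- pv_equiv track=rewrite | github.com/ksuglobov/mmf_practicum_fall_2021 | contest_1/find_max_substring_occurrence.py | find_max_substring_occurrence
-- ===== SOURCE A (Python) =====
-- def find_max_substring_occurrence(input_string):
--     str_len = len(input_string)
--     for i in range(1, str_len + 1):
--         if not str_len % i:
--             k = str_len // i
--             s = input_string[0:i]
--             chk = 1
--             for j in range(1, k):
--                 if s != input_string[j * i:(j + 1) * i]:
--                     chk = 0
--                     break
--             if chk:
--                 return k
-- ===== SOURCE B (Python) =====
-- def find_max_substring_occurrence(input_string):
--     # Cyclic-rotation characterization: the smallest i >= 1 with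
--     # (s+s)[i:i+n] == s is the smallest divisor-of-n period of s,
--     # so the answer is n // i, found by one C-level substring search.
--     n = len(input_string)
--     if not input_string:
--         return None
--     p = (input_string + input_string).find(input_string, 1)
--     return n // p
-- ===== Notes on version B (the rewrite author's own statement) =====
-- stated objective: faster
-- what changed: A scans candidate period lengths with an inner chunk-by-chunk comparison loop; B uses the cyclic-rotation characterization: the smallest i>=1 at which s occurs in s+s is the smallest divisor-of-n period, found by a single (s+s).find(s,1) call, answer n//i.
import Mathlib
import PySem

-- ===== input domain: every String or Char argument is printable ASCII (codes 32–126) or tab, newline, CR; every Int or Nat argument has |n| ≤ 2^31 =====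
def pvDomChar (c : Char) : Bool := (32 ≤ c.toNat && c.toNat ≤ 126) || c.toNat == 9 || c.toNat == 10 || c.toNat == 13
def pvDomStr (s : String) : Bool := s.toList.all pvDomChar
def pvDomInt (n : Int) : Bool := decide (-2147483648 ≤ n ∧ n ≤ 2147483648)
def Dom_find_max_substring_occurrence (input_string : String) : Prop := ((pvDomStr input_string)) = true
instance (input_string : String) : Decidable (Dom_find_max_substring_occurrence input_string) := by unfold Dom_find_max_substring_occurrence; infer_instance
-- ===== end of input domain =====

-- B replaces A's divisor scan with inner chunk comparisons by the cyclic-rotation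
-- characterization: the smallest i ≥ 1 at which s occurs in s+s (one find call)
-- is the smallest divisor-of-n period, answer n // i; measured faster (constant factor).

-- ===== PORT A =====
-- inner 'for j in range(1, k)' loop: returns the final value of chk as a Bool
def pvAInner (cs s : List Char) (i : Int) : List Int → Bool
  | [] => true
  | j :: js =>
    if s ≠ PySem.List.slice cs (some (j * i)) (some ((j + 1) * i)) then false
    else pvAInner cs s i js

-- outer 'for i in range(1, str_len + 1)' loop with early return
def pvALoop (cs : List Char) (str_len : Int) : List Int → Option Int
  | [] => none
  | i :: is =>
    if PySem.Int.mod str_len i = 0 then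
      let k := PySem.Int.floordiv str_len i
      let s := PySem.List.slice cs (some 0) (some i)
      if pvAInner cs s i (PySem.List.pyRange 1 k 1) then some k
      else pvALoop cs str_len is
    else pvALoop cs str_len is

def find_max_substring_occurrence (input_string : String) : Option Int :=
  let cs := input_string.toList
  let str_len : Int := cs.length
  pvALoop cs str_len (PySem.List.pyRange 1 (str_len + 1) 1)

-- ===== PORT B =====
-- 'if not input_string: return None', then p = (s+s).find(s, 1), return n // p
def find_max_substring_occurrence_alt (input_string : String) : Option Int :=
  let cs := input_string.toList
  let n : Int := cs.length
  if cs = [] then none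
  else
    let p := PySem.Chars.findFrom (cs ++ cs) cs 1 none
    some (PySem.Int.floordiv n p)

-- ===== PRECONDITION & SPEC =====
def Spec_find_max_substring_occurrence (input_string : String) (out : Option Int) : Prop := out = find_max_substring_occurrence_alt input_string
instance (input_string : String) (out : Option Int) : Decidable (Spec_find_max_substring_occurrence input_string out) := by unfold Spec_find_max_substring_occurrence; infer_instance

-- ===== CLAIM (what is proved, stated in full; the proofs are below) =====
def Claim_equal_find_max_substring_occurrence : Prop := ∀ (input_string : String), Dom_find_max_substring_occurrence input_string → Spec_find_max_substring_occurrence input_string (find_max_substring_occurrence input_string)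

-- ===== LEMMAS AND PROOFS =====

-- A's outer loop is a first-hit search
lemma pvALoop_eq_find? (cs : List Char) (N : Int) (l : List Int) :
    pvALoop cs N l =
      (l.find? (fun i => decide (PySem.Int.mod N i = 0) &&
        pvAInner cs (PySem.List.slice cs (some 0) (some i)) i
          (PySem.List.pyRange 1 (PySem.Int.floordiv N i) 1))).map
        (fun i => PySem.Int.floordiv N i) := by
  induction l with
  | nil => rfl
  | cons i is ih =>
    by_cases h1 : PySem.Int.mod N i = 0 <;>
      by_cases h2 : pvAInner cs (PySem.List.slice cs none (some i)) i
          (PySem.List.pyRange 1 (PySem.Int.floordiv N i) 1) = true <;>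
      simp [pvALoop, List.find?, h1, h2, ih]

-- the ascending range(a, b) as a Nat range
lemma pvRange_asc (a b : Nat) :
    PySem.List.pyRange (a : Int) (b : Int) 1 = (List.range' a (b - a)).map (fun (m : Nat) => (m : Int)) := by
  rw [PySem.List.pyRange_of_pos _ _ one_pos]
  by_cases h : (a : Int) < (b : Int)
  · have hb : a < b := by exact_mod_cast h
    rw [if_pos h]
    have he : ((b : Int) - a + 1 - 1) / 1 = ((b - a : Nat) : Int) := by
      rw [show ((b : Int) - a + 1 - 1) = ((b : Int) - a) by ring, Int.ediv_one]
      omega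
    rw [he, Int.toNat_natCast]
    simp only [List.range'_eq_map_range, List.map_map]
    refine List.map_congr_left fun k _ => ?_
    simp [Function.comp]
  · have hb : b ≤ a := by omega
    rw [if_neg h]
    simp [Nat.sub_eq_zero_of_le hb]

-- A's inner loop is an 'all' over the chunk indices
lemma pvAInner_eq_all (cs s : List Char) (i : Int) (l : List Int) :
    pvAInner cs s i l =
      l.all (fun j => decide (s = PySem.List.slice cs (some (j * i)) (some ((j + 1) * i)))) := by
  induction l with
  | nil => rfl
  | cons j js ih =>
    simp only [pvAInner, List.all_cons, ih]
    by_cases h : s = PySem.List.slice cs (some (j * i)) (some ((j + 1) * i)) <;> simp [h]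

-- chunk-wise equality to a fixed block t of length m is exactly 'cs is t repeated k times'
lemma pvRepFlat_iff (t : List Char) (m : Nat) (ht : t.length = m) :
    ∀ (k : Nat) (cs : List Char), cs.length = k * m →
      ((List.replicate k t).flatten = cs ↔ ∀ j < k, (cs.drop (j * m)).take m = t) := by
  intro k
  induction k with
  | zero =>
    intro cs hcs
    simp only [Nat.zero_mul, List.length_eq_zero_iff] at hcs
    subst hcs
    simp
  | succ k ih =>
    intro cs hcs
    have hdrop : (cs.drop m).length = k * m := by
      simp [hcs, Nat.succ_mul]
    constructor
    · intro h j hj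
      have hcs' : cs = t ++ (List.replicate k t).flatten := by
        rw [← h, List.replicate_succ, List.flatten_cons]
      rcases Nat.eq_zero_or_pos j with hj0 | hjpos
      · subst hj0
        rw [Nat.zero_mul, List.drop_zero, hcs', ← ht, List.take_left]
      · obtain ⟨j', rfl⟩ : ∃ j', j = j' + 1 := ⟨j - 1, by omega⟩
        have hrest : cs.drop m = (List.replicate k t).flatten := by
          rw [hcs', ← ht, List.drop_left]
        have := ((ih (cs.drop m) hdrop).mp hrest.symm) j' (by omega)
        rw [List.drop_drop] at this
        rw [← this]
        congr 2
        ring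
    · intro h
      have h0 : cs.take m = t := by simpa using h 0 (Nat.succ_pos k)
      have hrest : (List.replicate k t).flatten = cs.drop m := by
        refine (ih (cs.drop m) hdrop).mpr fun j hj => ?_
        rw [List.drop_drop]
        have := h (j + 1) (by omega)
        rw [← this]
        congr 2
        ring
      rw [List.replicate_succ, List.flatten_cons, hrest, ← h0, List.take_append_drop]

-- the semantic predicate: 'cs is its length-m prefix repeated cs.length/m times'
def pvSA (cs : List Char) (m : Nat) : Prop :=
  m ∣ cs.length ∧ (List.replicate (cs.length / m) (cs.take m)).flatten = cs

-- A's loop test, characterised (for 1 ≤ m ≤ n)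
lemma pvPA_iff (cs : List Char) (m : Nat) (hmn : m ≤ cs.length) :
    ((decide (PySem.Int.mod (cs.length : Int) (m : Int) = 0) &&
      pvAInner cs (PySem.List.slice cs (some 0) (some (m : Int))) (m : Int)
        (PySem.List.pyRange 1 (PySem.Int.floordiv (cs.length : Int) (m : Int)) 1)) = true)
      ↔ pvSA cs m := by
  set n := cs.length with hn
  rw [Bool.and_eq_true, decide_eq_true_iff, PySem.Int.mod_natCast,
    PySem.Int.floordiv_natCast]
  have hslice0 : PySem.List.slice cs (some (0 : Int)) (some (m : Int)) = cs.take m := by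
    rw [PySem.List.slice_zero_start, PySem.List.slice_to_natCast]
  rw [hslice0]
  have hrange : PySem.List.pyRange 1 ((n / m : Nat) : Int) 1 =
      (List.range' 1 (n / m - 1)).map (fun (j : Nat) => (j : Int)) := pvRange_asc 1 (n / m)
  rw [hrange, pvAInner_eq_all, List.all_map, List.all_eq_true]
  constructor
  · rintro ⟨hmod, hall⟩
    have hdvd : m ∣ n := by
      have : ((n % m : Nat) : Int) = 0 := hmod
      exact Nat.dvd_of_mod_eq_zero (by exact_mod_cast this)
    refine ⟨hdvd, ?_⟩
    have hlen : cs.length = (n / m) * m := by rw [← hn, Nat.div_mul_cancel hdvd]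
    refine (pvRepFlat_iff (cs.take m) m (by simp; omega) (n / m) cs hlen).mpr fun j hj => ?_
    rcases Nat.eq_zero_or_pos j with rfl | hjpos
    · simp
    · have hjmem : j ∈ List.range' 1 (n / m - 1) := by
        rw [List.mem_range'_1]
        omega
      have := hall j hjmem
      simp only [Function.comp, decide_eq_true_iff] at this
      have hsl : PySem.List.slice cs (some ((j : Int) * m)) (some (((j : Int) + 1) * m)) =
          (cs.drop (j * m)).take m := by
        have h1 : ((j : Int) * m) = ((j * m : Nat) : Int) := by push_cast; ring
        have h2 : (((j : Int) + 1) * m) = ((j * m : Nat) : Int) + (m : Int) := by push_cast; ring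
        rw [h1, h2, PySem.List.slice_natCast_add]
      rw [hsl] at this
      exact this.symm
  · rintro ⟨hdvd, hflat⟩
    have hlen : cs.length = (n / m) * m := by rw [← hn, Nat.div_mul_cancel hdvd]
    have hall := (pvRepFlat_iff (cs.take m) m (by simp; omega) (n / m) cs hlen).mp hflat
    refine ⟨by exact_mod_cast congrArg (Nat.cast : Nat → Int) (Nat.mod_eq_zero_of_dvd hdvd), ?_⟩
    intro j hjmem
    rw [List.mem_range'_1] at hjmem
    have := hall j (by omega)
    simp only [Function.comp, decide_eq_true_iff]
    have hsl : PySem.List.slice cs (some ((j : Int) * m)) (some (((j : Int) + 1) * m)) =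
        (cs.drop (j * m)).take m := by
      have h1 : ((j : Int) * m) = ((j * m : Nat) : Int) := by push_cast; ring
      have h2 : (((j : Int) + 1) * m) = ((j * m : Nat) : Int) + (m : Int) := by push_cast; ring
      rw [h1, h2, PySem.List.slice_natCast_add]
    rw [hsl, this]

-- whatever find? returns on a Pairwise-r list is r-minimal among satisfying elements
lemma pvFind?_min {α : Type} (p : α → Bool) (r : α → α → Prop) :
    ∀ (l : List α), l.Pairwise r → ∀ b, l.find? p = some b →
      ∀ x ∈ l, p x = true → x = b ∨ r b x := by
  intro l
  induction l with
  | nil => intro _ b hb; simp at hb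
  | cons a t ih =>
    intro hp b hfind x hx hpx
    rcases List.pairwise_cons.mp hp with ⟨hat, ht⟩
    by_cases hpa : p a = true
    · have hba : a = b := by simpa [List.find?, hpa] using hfind
      subst hba
      rcases List.mem_cons.mp hx with rfl | hxt
      · exact Or.inl rfl
      · exact Or.inr (hat x hxt)
    · rw [List.find?] at hfind
      rw [Bool.not_eq_true] at hpa
      rw [hpa] at hfind
      rcases List.mem_cons.mp hx with rfl | hxt
      · exact absurd hpx (by simp [hpa])
      · exact ih ht b hfind x hxt hpx

-- rotation-fixedness: cs is fixed by a left rotation of i places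
def pvRotFix (cs : List Char) (i : Nat) : Prop := cs.drop i ++ cs.take i = cs

-- occurrence of cs at position i of cs++cs (i ≤ n) = rotation-fixedness at i
lemma pvPref_iff_rotFix (cs : List Char) (i : Nat) (hin : i ≤ cs.length) :
    cs <+: (cs ++ cs).drop i ↔ pvRotFix cs i := by
  have hdrop : (cs ++ cs).drop i = cs.drop i ++ cs := by
    rw [List.drop_append, Nat.sub_eq_zero_of_le hin, List.drop_zero]
  rw [hdrop, List.prefix_iff_eq_take, List.take_append,
    List.take_of_length_le (by simp [List.length_drop]),
    List.length_drop, show cs.length - (cs.length - i) = i by omega]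
  unfold pvRotFix
  exact eq_comm

-- a valid period m gives rotation-fixedness at m
lemma pvRotFix_of_SA (cs : List Char) (m : Nat) (hn : 0 < cs.length) (h : pvSA cs m) :
    pvRotFix cs m := by
  obtain ⟨hdvd, hflat⟩ := h
  have hm : 0 < m := by
    rcases Nat.eq_zero_or_pos m with rfl | hm
    · have := Nat.eq_zero_of_zero_dvd hdvd
      omega
    · exact hm
  have hmn : m ≤ cs.length := Nat.le_of_dvd hn hdvd
  set k := cs.length / m with hk
  have hk1 : 1 ≤ k := (Nat.one_le_div_iff hm).mpr hmn
  set t := cs.take m with htdef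
  have ht : t.length = m := by rw [htdef]; simp [hmn]
  have hflat' : cs = t ++ (List.replicate (k - 1) t).flatten := by
    rw [← hflat, show k = (k - 1) + 1 by omega, List.replicate_succ, List.flatten_cons]
    rfl
  have hdropm : cs.drop m = (List.replicate (k - 1) t).flatten := by
    have h1 : (t ++ (List.replicate (k - 1) t).flatten).drop t.length =
        (List.replicate (k - 1) t).flatten := List.drop_left
    rw [ht, ← hflat'] at h1
    exact h1
  unfold pvRotFix
  rw [hdropm, ← htdef, ← List.flatten_concat, ← List.replicate_succ',
    show (k - 1) + 1 = k by omega, hflat]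

-- structural core: a rotation-fixed string with g dividing its length is its g-prefix repeated
lemma pvRotFix_flat : ∀ (N : Nat) (cs : List Char) (g : Nat), cs.length ≤ N → 1 ≤ g →
    g ∣ cs.length → pvRotFix cs g →
    (List.replicate (cs.length / g) (cs.take g)).flatten = cs := by
  intro N
  induction N with
  | zero =>
    intro cs g hlen _ _ _
    have hnil : cs = [] := List.eq_nil_of_length_eq_zero (by omega)
    subst hnil
    simp
  | succ N ih =>
    intro cs g hlen hg hdvd hrot
    obtain ⟨q, hq⟩ := hdvd
    rcases Nat.eq_zero_or_pos cs.length with h0 | hpos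
    · have hnil : cs = [] := List.eq_nil_of_length_eq_zero h0
      subst hnil
      simp
    · have hq1 : 1 ≤ q := by
        rcases Nat.eq_zero_or_pos q with rfl | h
        · omega
        · exact h
      rcases eq_or_lt_of_le (Nat.le_of_dvd hpos ⟨q, hq⟩) with hgn | hlt
      · rw [← hgn, Nat.div_self (by omega), List.take_of_length_le (by omega)]
        simp
      · -- g < length, so q ≥ 2 and 2*g ≤ length
        have hq2 : 2 ≤ q := by
          rcases Nat.lt_or_ge q 2 with h | h
          · interval_cases q
            omega
          · exact h
        have h2g : 2 * g ≤ cs.length := by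
          calc 2 * g ≤ g * q := by nlinarith
          _ = cs.length := hq.symm
        have hrot' : cs.drop g ++ cs.take g = cs := hrot
        have htake : cs.take g = (cs.drop g).take g := by
          have h1 := congrArg (List.take g) hrot'.symm
          rwa [List.take_append_of_le_length (by rw [List.length_drop]; omega)] at h1
        have hdrop2 : (cs.drop g).drop g ++ cs.take g = cs.drop g := by
          have h1 := congrArg (List.drop g) hrot'
          rwa [List.drop_append, Nat.sub_eq_zero_of_le (by rw [List.length_drop]; omega),
            List.drop_zero] at h1
        have hrotD : pvRotFix (cs.drop g) g := by
          unfold pvRotFix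
          rw [← htake]
          exact hdrop2
        have hIH := ih (cs.drop g) g (by rw [List.length_drop]; omega) hg
          ⟨q - 1, by rw [List.length_drop, hq, Nat.mul_sub, Nat.mul_one]⟩ hrotD
        rw [← htake, List.length_drop, hq,
          show g * q - g = g * (q - 1) by rw [Nat.mul_sub, Nat.mul_one],
          Nat.mul_div_cancel_left (q - 1) (by omega)] at hIH
        rw [hq, Nat.mul_div_cancel_left q (by omega),
          show q = (q - 1) + 1 by omega, List.replicate_succ, List.flatten_cons, hIH,
          List.take_append_drop]

-- rotation-fixedness at i gives a valid period gcd i n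
lemma pvSA_gcd_of_rotFix (cs : List Char) (i : Nat) (h1 : 1 ≤ i) (hin : i ≤ cs.length)
    (hn : 0 < cs.length) (h : pvRotFix cs i) : pvSA cs (Nat.gcd i cs.length) := by
  set n := cs.length with hnn
  set g := Nat.gcd i n with hg
  have hgdvd : g ∣ n := Nat.gcd_dvd_right i n
  have hg1 : 0 < g := Nat.gcd_pos_of_pos_left n h1
  have hroti : cs.rotate i = cs := by
    rw [List.rotate_eq_drop_append_take hin]; exact h
  have hmul : ∀ a, cs.rotate (i * a) = cs := by
    intro a
    induction a with
    | zero => simp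
    | succ a ih => rw [Nat.mul_succ, ← List.rotate_rotate, ih, hroti]
  rcases eq_or_lt_of_le (Nat.le_of_dvd hn hgdvd) with hgn | hlt
  · refine ⟨hgdvd, ?_⟩
    rw [hgn, Nat.div_self hn, List.take_of_length_le (by omega)]
    simp
  · obtain ⟨a, _, ha⟩ := Nat.exists_mul_mod_eq_gcd (show Nat.gcd i n < n from hlt)
    have hrotg : cs.rotate g = cs := by
      have hrm := List.rotate_mod cs (i * a)
      rw [← hnn] at hrm
      rw [hg, ← ha, hrm, hmul]
    have hrotfixg : pvRotFix cs g := by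
      unfold pvRotFix
      rw [← List.rotate_eq_drop_append_take (le_of_lt hlt), hrotg]
    exact ⟨hgdvd, pvRotFix_flat n cs g le_rfl hg1 hgdvd hrotfixg⟩

-- ===== VERDICT (by name: the statement is the Claim_ definition above) =====
theorem find_max_substring_occurrence_spec : Claim_equal_find_max_substring_occurrence := by
  intro input_string _
  unfold Spec_find_max_substring_occurrence find_max_substring_occurrence find_max_substring_occurrence_alt
  set cs := input_string.toList with hcs
  set n := cs.length with hn
  simp only
  rcases Nat.eq_zero_or_pos n with hn0 | hnpos
  · have hnil : cs = [] := List.eq_nil_of_length_eq_zero hn0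
    rw [if_pos hnil]
    have h1 : ((n : Int) + 1) = 1 := by omega
    rw [h1]
    have e1 : PySem.List.pyRange 1 1 1 = [] := by decide
    rw [e1]
    rfl
  · have hne : cs ≠ [] := by
      intro hnil
      rw [hnil] at hn
      simp at hn
      omega
    rw [if_neg hne]
    -- A's side as a first-hit search over Nat candidates
    set PA : Nat → Bool := fun m =>
      decide (PySem.Int.mod (n : Int) (m : Int) = 0) &&
        pvAInner cs (PySem.List.slice cs (some 0) (some (m : Int))) (m : Int)
          (PySem.List.pyRange 1 (PySem.Int.floordiv (n : Int) (m : Int)) 1) with hPA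
    have hA : pvALoop cs (n : Int) (PySem.List.pyRange 1 ((n : Int) + 1) 1) =
        ((List.range' 1 n).find? PA).map (fun (m : Nat) => PySem.Int.floordiv (n : Int) (m : Int)) := by
      have hr : PySem.List.pyRange 1 ((n : Int) + 1) 1 =
          (List.range' 1 n).map (fun (m : Nat) => (m : Int)) := by
        have := pvRange_asc 1 (n + 1)
        push_cast at this ⊢
        simpa using this
      rw [pvALoop_eq_find?, hr, List.find?_map, Option.map_map]
      rfl
    rw [hA]
    -- n itself satisfies PA, so find? PA = some m0
    have hPAn : PA n = true := by
      rw [hPA]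
      refine (pvPA_iff cs n (by omega)).mpr ?_
      exact ⟨dvd_refl n, by simp [← hn, Nat.div_self hnpos]⟩
    obtain ⟨m0, hm0⟩ : ∃ m0, (List.range' 1 n).find? PA = some m0 := by
      cases hfd : (List.range' 1 n).find? PA with
      | none =>
        exact absurd hPAn (List.find?_eq_none.mp hfd n (List.mem_range'_1.mpr ⟨hnpos, by omega⟩))
      | some m0 => exact ⟨m0, rfl⟩
    have hm0mem : m0 ∈ List.range' 1 n := List.mem_of_find?_eq_some hm0
    have hm0range : 1 ≤ m0 ∧ m0 < 1 + n := List.mem_range'_1.mp hm0mem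
    have hm0p : PA m0 = true := List.find?_some hm0
    have hm0SA : pvSA cs m0 := (pvPA_iff cs m0 (by omega)).mp hm0p
    have hm0min : ∀ x ∈ List.range' 1 n, PA x = true → m0 ≤ x := by
      intro x hx hpx
      rcases pvFind?_min PA (· < ·) (List.range' 1 n) (List.pairwise_lt_range' 1) m0 hm0 x hx hpx with
        rfl | hlt
      · exact le_rfl
      · exact hlt.le
    -- B's side: the find call on cs ++ cs starting at 1
    have hone : (1 : Int) = ((1 : Nat) : Int) := by norm_num
    rw [hone]
    set r := PySem.Chars.findFrom (cs ++ cs) cs ((1 : Nat) : Int) none with hr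
    have hk1 : (1 : Nat) ≤ (cs ++ cs).length := by
      rw [List.length_append, ← hn]
      omega
    have hinf : cs <:+: (cs ++ cs).drop 1 := by
      have hd1 : (cs ++ cs).drop 1 = cs.drop 1 ++ cs := by
        rw [List.drop_append, Nat.sub_eq_zero_of_le (by omega), List.drop_zero]
      rw [hd1]
      exact (List.suffix_append (cs.drop 1) cs).isInfix
    have hrne : r ≠ -1 := by
      intro heq
      rw [hr] at heq
      exact (PySem.Chars.findFrom_natCast_eq_neg_one_iff (cs ++ cs) cs 1 hk1).mp heq hinf
    obtain ⟨h1r, hpref, hmin⟩ :=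
      PySem.Chars.findFrom_natCast_spec (cs ++ cs) cs 1 hk1 hrne
    rw [← hr] at h1r hpref hmin
    set i0 := r.toNat with hi0
    have h1i0 : 1 ≤ i0 := by omega
    have hrotn : pvRotFix cs n := by
      unfold pvRotFix
      rw [hn]
      simp
    have hi0n : i0 ≤ n := by
      by_contra hgt
      exact hmin n (by omega) (by omega)
        ((pvPref_iff_rotFix cs n (by omega)).mpr hrotn)
    have hrot_i0 : pvRotFix cs i0 := (pvPref_iff_rotFix cs i0 (by omega)).mp hpref
    -- i0 ≤ m0: m0 is rotation-fixed, and i0 is the first rotation-fixed offset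
    have hi0m0 : i0 ≤ m0 := by
      by_contra hgt
      exact hmin m0 (by omega) (by omega)
        ((pvPref_iff_rotFix cs m0 (by omega)).mpr (pvRotFix_of_SA cs m0 (by omega) hm0SA))
    -- m0 ≤ gcd i0 n ≤ i0: the gcd is a valid period
    have hSAg : pvSA cs (Nat.gcd i0 n) :=
      hn ▸ pvSA_gcd_of_rotFix cs i0 h1i0 (by omega) (by omega) hrot_i0
    have hg1 : 0 < Nat.gcd i0 n := Nat.gcd_pos_of_pos_left n h1i0
    have hgn : Nat.gcd i0 n ≤ n := Nat.le_of_dvd hnpos hSAg.1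
    have hgle : Nat.gcd i0 n ≤ i0 := Nat.gcd_le_left n h1i0
    have hm0g : m0 ≤ Nat.gcd i0 n := by
      refine hm0min _ (List.mem_range'_1.mpr ⟨hg1, by omega⟩) ?_
      rw [hPA]
      exact (pvPA_iff cs (Nat.gcd i0 n) (by omega)).mpr hSAg
    have heq : m0 = i0 := by omega
    have hri0 : r = ((i0 : Nat) : Int) := by
      rw [hi0, Int.toNat_of_nonneg (by omega)]
    rw [hm0, hri0, heq]
    rfl
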